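-- pv_equiv track=rewrite | github.com/fitwindev-oss/analysis | src/reports/sections/verdict.py | _aggregate_status
-- ===== SOURCE A (Python) =====
-- def _aggregate_status(statuses: list[str]) -> str:
--     classifiable = [s for s in statuses if s in ("ok", "caution", "warning")]
--     if not classifiable:
--         return "neutral"
--     if "warning" in classifiable:
--         return "warning"
--     if "caution" in classifiable:
--         return "caution"
--     return "ok"
-- ===== SOURCE B (Python) =====
-- ORDER = {"ok": 0, "caution": 1, "warning": 2}
--
-- def _aggregate_status(statuses: list[str]) -> str:
--     priorities = [ORDER[s] for s in statuses if s in ORDER]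
--     if not priorities:
--         return "neutral"
--     m = max(priorities)
--     return "warning" if m == 2 else "caution" if m == 1 else "ok"
-- ===== Notes on version B (the rewrite author's own statement) =====
-- stated objective: alternative
-- what changed: Replaces the filter followed by three successive membership scans with a single numeric-priority list and one max over it, decoded back to a status name.
import Mathlib
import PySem

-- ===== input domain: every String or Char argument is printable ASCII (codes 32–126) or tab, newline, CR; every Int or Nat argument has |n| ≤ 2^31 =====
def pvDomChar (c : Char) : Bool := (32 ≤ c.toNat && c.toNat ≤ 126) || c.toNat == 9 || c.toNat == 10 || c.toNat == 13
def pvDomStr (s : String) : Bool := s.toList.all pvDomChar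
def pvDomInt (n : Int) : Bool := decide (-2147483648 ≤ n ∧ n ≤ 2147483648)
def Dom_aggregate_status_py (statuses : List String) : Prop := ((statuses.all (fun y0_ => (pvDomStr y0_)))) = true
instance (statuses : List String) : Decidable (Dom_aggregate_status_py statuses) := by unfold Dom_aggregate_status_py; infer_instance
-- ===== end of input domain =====

-- B replaces A's filter-then-three-membership-scans with one numeric-priority pass and a max; alternative structure, same cost.


-- ===== PORT A =====
def aggregate_status_py (statuses : List String) : String :=
  let classifiable := statuses.filter (fun s => s == "ok" || s == "caution" || s == "warning")
  if classifiable.isEmpty then "neutral"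
  else if classifiable.contains "warning" then "warning"
  else if classifiable.contains "caution" then "caution"
  else "ok"

-- ===== PORT B =====
-- lookup in the literal dict ORDER = {"ok": 0, "caution": 1, "warning": 2} (ORDER[s] / 's in ORDER')
def pvOrderGet (s : String) : Option Int :=
  if s == "ok" then some 0 else if s == "caution" then some 1
  else if s == "warning" then some 2 else none

def aggregate_status_py_alt (statuses : List String) : String :=
  let priorities := statuses.filterMap pvOrderGet
  match PySem.List.max? priorities (fun x => x) with
  | none => "neutral"
  | some m => if m == 2 then "warning" else if m == 1 then "caution" else "ok"

-- ===== PRECONDITION & SPEC =====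
def Spec_aggregate_status_py (statuses : List String) (out : String) : Prop := out = aggregate_status_py_alt statuses
instance (statuses : List String) (out : String) : Decidable (Spec_aggregate_status_py statuses out) := by unfold Spec_aggregate_status_py; infer_instance

-- ===== CLAIM (what is proved, stated in full; the proofs are below) =====
def Claim_equal_aggregate_status_py : Prop := ∀ (statuses : List String), Dom_aggregate_status_py statuses → Spec_aggregate_status_py statuses (aggregate_status_py statuses)

-- ===== LEMMAS AND PROOFS =====

theorem mem_priorities_iff (statuses : List String) (m : Int) :
    m ∈ statuses.filterMap pvOrderGet ↔
      (m = 0 ∧ "ok" ∈ statuses) ∨ (m = 1 ∧ "caution" ∈ statuses) ∨ (m = 2 ∧ "warning" ∈ statuses) := by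
  simp only [List.mem_filterMap]
  constructor
  · rintro ⟨s, hs, ho⟩
    unfold pvOrderGet at ho
    split_ifs at ho with h1 h2 h3 <;> simp_all
  · rintro (⟨rfl, h⟩ | ⟨rfl, h⟩ | ⟨rfl, h⟩)
    · exact ⟨"ok", h, rfl⟩
    · exact ⟨"caution", h, rfl⟩
    · exact ⟨"warning", h, rfl⟩

theorem priorities_nil_iff (statuses : List String) :
    statuses.filterMap pvOrderGet = [] ↔
      statuses.filter (fun s => s == "ok" || s == "caution" || s == "warning") = [] := by
  rw [List.filterMap_eq_nil_iff, List.filter_eq_nil_iff]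
  constructor <;> intro h s hs <;> have := h s hs <;>
    unfold pvOrderGet at * <;> split_ifs at * <;> simp_all

-- ===== VERDICT (by name: the statement is the Claim_ definition above) =====
theorem aggregate_status_py_spec : Claim_equal_aggregate_status_py := by
  intro statuses _
  unfold Spec_aggregate_status_py aggregate_status_py aggregate_status_py_alt
  simp only
  by_cases hnil : statuses.filter (fun s => s == "ok" || s == "caution" || s == "warning") = []
  · have : statuses.filterMap pvOrderGet = [] := (priorities_nil_iff statuses).mpr hnil
    simp [hnil, this, PySem.List.max?]
  · have hpnil : statuses.filterMap pvOrderGet ≠ [] := by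
      intro h; exact hnil ((priorities_nil_iff statuses).mp h)
    obtain ⟨m, hm⟩ : ∃ m, PySem.List.max? (statuses.filterMap pvOrderGet) (fun x => x) = some m := by
      cases hmx : PySem.List.max? (statuses.filterMap pvOrderGet) (fun x => x) with
      | none => exact absurd (((PySem.List.max?_eq_none_iff _ _).mp hmx)) hpnil
      | some m => exact ⟨m, rfl⟩
    have hmem := (mem_priorities_iff statuses m).mp (PySem.List.max?_mem hm)
    have hmax : ∀ y ∈ statuses.filterMap pvOrderGet, y ≤ m := PySem.List.max?_isMax hm
    have hw2 : "warning" ∈ statuses → (2:Int) ≤ m := fun h =>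
      hmax 2 ((mem_priorities_iff statuses 2).mpr (Or.inr (Or.inr ⟨rfl, h⟩)))
    have hc1 : "caution" ∈ statuses → (1:Int) ≤ m := fun h =>
      hmax 1 ((mem_priorities_iff statuses 1).mpr (Or.inr (Or.inl ⟨rfl, h⟩)))
    rw [hm]
    rcases hmem with ⟨rfl, hok⟩ | ⟨rfl, hca⟩ | ⟨rfl, hwa⟩
    · -- m = 0 : no caution, no warning in statuses
      have hnw : "warning" ∉ statuses := fun h => by have := hw2 h; omega
      have hnc : "caution" ∉ statuses := fun h => by have := hc1 h; omega
      simp [hnil, List.mem_filter, hnw, hnc, List.isEmpty_iff]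
    · -- m = 1 : caution present, no warning
      have hnw : "warning" ∉ statuses := fun h => by have := hw2 h; omega
      simp [hnil, List.mem_filter, hnw, hca, List.isEmpty_iff]
    · -- m = 2 : warning present
      simp [hnil, List.mem_filter, hwa, List.isEmpty_iff]
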